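-- pv_equiv track=rewrite | github.com/R-web-stack/Hierarchical-Hybrid-Neural-Network-Ranking-Models | Hierarchical-Hybrid-Neural-Network-Ranking-Models/code/cn explicit features.py | real_word_num
-- ===== SOURCE A (Python) =====
-- def real_word_num(text_data):
--     pos = text_data.split(' ')
--     real_words = [
--         tag for tag in pos if tag in [
--              'n', 'np', 'ns', 'ni', 'nz', 'm', 'q', 'mq', 't', 'f', 's', 'v',
--             'vm', 'vd', 'a', 'j'
--         ]
--     ]
--     return len(real_words)
-- ===== SOURCE B (Python) =====
-- REAL_TAGS = ('n', 'np', 'ns', 'ni', 'nz', 'm', 'q', 'mq', 't', 'f', 's', 'v',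
--              'vm', 'vd', 'a', 'j')
--
-- def real_word_num(text_data):
--     counts = {}
--     for tok in text_data.split(' '):
--         counts[tok] = counts.get(tok, 0) + 1
--     return sum(counts.get(tag, 0) for tag in REAL_TAGS)
-- ===== Notes on version B (the rewrite author's own statement) =====
-- stated objective: alternative
-- what changed: B builds a frequency table of all tokens once and then sums the counts of the 16 fixed real-word tags, inverting A's per-token membership scan over the tag list.
import Mathlib
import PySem

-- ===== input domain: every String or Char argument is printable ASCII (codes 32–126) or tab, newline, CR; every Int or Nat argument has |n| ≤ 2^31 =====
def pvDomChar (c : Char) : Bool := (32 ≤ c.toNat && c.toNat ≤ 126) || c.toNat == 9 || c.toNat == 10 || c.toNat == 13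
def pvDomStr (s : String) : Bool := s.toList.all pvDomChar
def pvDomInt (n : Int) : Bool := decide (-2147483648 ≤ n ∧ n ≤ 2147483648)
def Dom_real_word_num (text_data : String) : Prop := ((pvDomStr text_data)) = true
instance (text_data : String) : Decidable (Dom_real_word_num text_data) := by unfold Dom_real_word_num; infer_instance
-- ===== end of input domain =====

-- B builds a token-frequency table once, then sums the counts of the 16 fixed tags,
-- inverting A's per-token membership scan over the tag list (objective: alternative).

-- ===== PORT A =====
def real_word_num (text_data : String) : Int :=
  let pos := (PySem.Str.split? text_data " ").getD []
  let real_words := pos.filter (fun tag =>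
    tag ∈ ["n", "np", "ns", "ni", "nz", "m", "q", "mq", "t", "f", "s", "v",
           "vm", "vd", "a", "j"])
  (real_words.length : Int)

-- ===== PORT B =====
def realTags_alt : List String :=
  ["n", "np", "ns", "ni", "nz", "m", "q", "mq", "t", "f", "s", "v",
   "vm", "vd", "a", "j"]

def real_word_num_alt (text_data : String) : Int :=
  let counts := ((PySem.Str.split? text_data " ").getD []).foldl
    (fun d tok => d.insert tok (d.getD tok 0 + 1)) PySem.Dict.empty
  (realTags_alt.map (fun tag => counts.getD tag 0)).sum

-- ===== PRECONDITION & SPEC =====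
def Spec_real_word_num (text_data : String) (out : Int) : Prop := out = real_word_num_alt text_data
instance (text_data : String) (out : Int) : Decidable (Spec_real_word_num text_data out) := by unfold Spec_real_word_num; infer_instance

-- ===== CLAIM (what is proved, stated in full; the proofs are below) =====
def Claim_equal_real_word_num : Prop := ∀ (text_data : String), Dom_real_word_num text_data → Spec_real_word_num text_data (real_word_num text_data)

-- ===== LEMMAS AND PROOFS =====

-- Summing, over a duplicate-free tag list, the indicator of "x equals this tag"
-- gives the indicator of membership.
theorem sum_indicator_of_nodup (tags : List String) (x : String) (h : tags.Nodup) :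
    (tags.map (fun t => if x = t then (1 : Int) else 0)).sum
      = if x ∈ tags then 1 else 0 := by
  induction tags with
  | nil => simp
  | cons t ts ih =>
    simp only [List.nodup_cons] at h
    by_cases hx : x = t
    · subst hx
      simp [h.1, ih h.2]
    · simp [hx, ih h.2]

-- Summing per-tag occurrence counts over a duplicate-free tag list equals the
-- number of tokens that belong to the tag list.
theorem sum_counts_eq_filter_length (tags pos : List String) (h : tags.Nodup) :
    (tags.map (fun t => ((pos.count t : Nat) : Int))).sum
      = ((pos.filter (fun x => x ∈ tags)).length : Int) := by
  induction pos with
  | nil => simp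
  | cons x xs ih =>
    have hsplit :
        (tags.map (fun t => ((((x :: xs).count t : Nat)) : Int))).sum
          = (tags.map (fun t => ((xs.count t : Nat) : Int))).sum
            + (tags.map (fun t => if x = t then (1 : Int) else 0)).sum := by
      rw [← List.sum_map_add]
      refine congrArg List.sum (List.map_congr_left ?_)
      intro t _
      by_cases hxt : x = t
      · simp [hxt]
      · simp [hxt]
    rw [hsplit, sum_indicator_of_nodup tags x h, ih]
    by_cases hmem : x ∈ tags <;> simp [hmem]

-- ===== VERDICT (by name: the statement is the Claim_ definition above) =====
theorem real_word_num_spec : Claim_equal_real_word_num := by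
  intro text_data _
  unfold Spec_real_word_num real_word_num real_word_num_alt
  rw [PySem.Dict.foldl_insert_getD_add_one_eq_counter]
  simp only [PySem.Dict.getD_counter]
  have hnd : realTags_alt.Nodup := by decide
  rw [sum_counts_eq_filter_length realTags_alt _ hnd]
  rfl
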